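-- pv_equiv track=rewrite | github.com/studentofmusk/N150 | _Daily/Candy/main.py | candy1
-- ===== SOURCE A (Python) =====
-- from typing import List
--
-- def candy1(ratings: List[int]) -> int:
--     if len(ratings) == 1:
--         return 1
--
--     dp = [1] * len(ratings)
--     balanced = False
--     while not balanced:
--         balanced = True
--         for i in range(1, len(ratings)):
--             if ratings[i] > ratings[i-1]:
--                 if dp[i] <= dp[i-1]:
--                     dp[i] += 1
--                     balanced = False
--                 else:
--                     continue
--             elif ratings[i-1] > ratings[i]:
--                 if dp[i-1] <= dp[i]:
--                     dp[i-1] += 1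
--                     balanced = False
--                 else:
--                     continue
--             else:
--                 continue
--     return sum(dp)
-- ===== SOURCE B (Python) =====
-- def candy1(ratings):
--     n = len(ratings)
--     left = [1] * n
--     for i in range(1, n):
--         if ratings[i] > ratings[i - 1]:
--             left[i] = left[i - 1] + 1
--     right = [1] * n
--     for i in range(n - 2, -1, -1):
--         if ratings[i] > ratings[i + 1]:
--             right[i] = right[i + 1] + 1
--     return sum(max(l, r) for l, r in zip(left, right))
-- ===== Notes on version B (the rewrite author's own statement) =====
-- stated objective: faster
-- what changed: Replaced A's repeated relax-until-fixpoint sweeps over the dp array with the classic two-pass greedy (left-to-right rising runs, right-to-left falling runs, sum of pointwise maxima).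
import Mathlib
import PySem

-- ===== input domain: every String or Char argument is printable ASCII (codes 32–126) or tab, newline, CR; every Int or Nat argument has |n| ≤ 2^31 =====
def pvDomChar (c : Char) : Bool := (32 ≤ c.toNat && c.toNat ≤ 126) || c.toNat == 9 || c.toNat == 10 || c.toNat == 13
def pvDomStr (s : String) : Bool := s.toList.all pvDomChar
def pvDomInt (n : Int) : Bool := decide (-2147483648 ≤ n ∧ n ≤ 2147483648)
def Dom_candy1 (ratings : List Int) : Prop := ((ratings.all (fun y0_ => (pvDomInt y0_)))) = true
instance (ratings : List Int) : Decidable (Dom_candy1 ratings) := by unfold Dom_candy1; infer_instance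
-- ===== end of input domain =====

-- B replaces A's relax-until-fixpoint sweeps with the two-pass greedy
-- (rising runs left-to-right, falling runs right-to-left, sum of pointwise maxima).

-- ===== PORT A =====

-- one inner for-loop sweep of A ("for i in range(1, len(ratings)) …"), carrying dp;
-- returns the updated dp together with the `balanced` flag
def passAux : Int → Int → List Int → List Int → List Int × Bool
  | r0, d0, r1 :: rs, d1 :: ds =>
    if r1 > r0 then
      if d1 ≤ d0 then (d0 :: (passAux r1 (d1 + 1) rs ds).1, false)
      else (d0 :: (passAux r1 d1 rs ds).1, (passAux r1 d1 rs ds).2)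
    else if r0 > r1 then
      if d0 ≤ d1 then ((d0 + 1) :: (passAux r1 d1 rs ds).1, false)
      else (d0 :: (passAux r1 d1 rs ds).1, (passAux r1 d1 rs ds).2)
    else (d0 :: (passAux r1 d1 rs ds).1, (passAux r1 d1 rs ds).2)
  | _, d0, _, _ => ([d0], true)

def passFull (r dp : List Int) : List Int × Bool :=
  match r, dp with
  | r0 :: rs, d0 :: ds => passAux r0 d0 rs ds
  | _, _ => (dp, true)

-- ---- A-side bound used only in A's termination certificate: capA is an
-- index-based vector satisfying the neighbour constraints; dp stays pointwise
-- below it, so each unbalanced sweep (which strictly increases sum dp) can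
-- happen only finitely often ----

-- length of the strictly increasing run of ratings ending at index i
def incRun (r : List Int) : Nat → Nat
  | 0 => 0
  | i + 1 => if r.getD (i + 1) 0 > r.getD i 0 then incRun r i + 1 else 0

-- length of the strictly decreasing run of ratings starting at index i
def decRun (r : List Int) (i : Nat) : Nat :=
  if h : i + 1 < r.length then
    (if r.getD i 0 > r.getD (i + 1) 0 then decRun r (i + 1) + 1 else 0)
  else 0
  termination_by r.length - i

def capA (r : List Int) : List Int :=
  (List.range r.length).map (fun i => ((max (incRun r i) (decRun r i) : Nat) : Int) + 1)

-- A's while-loop: repeat the sweep until balanced, with enough gas (one more than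
-- the total of the capA bound) that the balanced fixpoint is always reached
def loopA : Nat → List Int → List Int → List Int
  | 0, _, dp => dp
  | gas + 1, r, dp =>
      if (passFull r dp).2 then dp
      else loopA gas r (passFull r dp).1

def candy1 (ratings : List Int) : Int :=
  if ratings.length = 1 then 1
  else (loopA ((capA ratings).sum.toNat + 1) ratings (List.replicate ratings.length 1)).sum

-- ===== PORT B =====

-- left-to-right pass: goL prev v rs emits v for the current position, then continues;
-- mirrors "left[i] = left[i-1]+1 if ratings[i] > ratings[i-1] else 1"
def goL (prev v : Int) : List Int → List Int
  | [] => [v]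
  | r1 :: rs => v :: goL r1 (if r1 > prev then v + 1 else 1) rs

def leftL : List Int → List Int
  | [] => []
  | r0 :: rs => goL r0 1 rs

-- right-to-left pass: "right[i] = right[i+1]+1 if ratings[i] > ratings[i+1] else 1"
def rightR : List Int → List Int
  | [] => []
  | [_] => [1]
  | r0 :: r1 :: rs =>
      match rightR (r1 :: rs) with
      | v :: t => (if r0 > r1 then v + 1 else 1) :: v :: t
      | [] => [1]

def mvec (r : List Int) : List Int := List.zipWith max (leftL r) (rightR r)

def candy1_alt (ratings : List Int) : Int := (mvec ratings).sum

-- ===== PRECONDITION & SPEC =====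
def Spec_candy1 (ratings : List Int) (out : Int) : Prop := out = candy1_alt ratings
instance (ratings : List Int) (out : Int) : Decidable (Spec_candy1 ratings out) := by unfold Spec_candy1; infer_instance

-- ===== CLAIM (what is proved, stated in full; the proofs are below) =====
def Claim_equal_candy1 : Prop := ∀ (ratings : List Int), Dom_candy1 ratings → Spec_candy1 ratings (candy1 ratings)

-- ===== LEMMAS AND PROOFS =====

-- the neighbour constraints A's while-loop enforces ("dp is balanced")
def OKa : Int → Int → List Int → List Int → Prop
  | r0, m0, r1 :: rs, m1 :: ms => (r1 > r0 → m0 < m1) ∧ (r0 > r1 → m1 < m0) ∧ OKa r1 m1 rs ms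
  | _, _, _, _ => True

def OKv : List Int → List Int → Prop
  | r0 :: rs, m0 :: ms => OKa r0 m0 rs ms
  | _, _ => True


lemma capA_len (r : List Int) : (capA r).length = r.length := by
  simp [capA]

lemma capA_getD (r : List Int) (i : Nat) (h : i < r.length) :
    (capA r).getD i 0 = ((max (incRun r i) (decRun r i) : Nat) : Int) + 1 := by
  simp [capA, List.getD_eq_getElem?_getD, h]

lemma OKa_of_get : ∀ (rs ms : List Int) (r0 m0 : Int),
    ms.length = rs.length →
    (∀ i : Nat, i + 1 < (r0 :: rs).length →
      ((r0 :: rs).getD (i+1) 0 > (r0 :: rs).getD i 0 →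
        (m0 :: ms).getD i 0 < (m0 :: ms).getD (i+1) 0) ∧
      ((r0 :: rs).getD i 0 > (r0 :: rs).getD (i+1) 0 →
        (m0 :: ms).getD (i+1) 0 < (m0 :: ms).getD i 0)) →
    OKa r0 m0 rs ms := by
  intro rs
  induction rs with
  | nil =>
    intro ms r0 m0 h _
    have : ms = [] := List.eq_nil_of_length_eq_zero (by simpa using h)
    subst this; exact trivial
  | cons r1 rs' ih =>
    intro ms r0 m0 h hidx
    cases ms with
    | nil => simp at h
    | cons m1 ms' =>
      have h0 := hidx 0 (by simp)
      refine ⟨by simpa using h0.1, by simpa using h0.2, ?_⟩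
      refine ih ms' r1 m1 (by simpa using h) ?_
      intro i hi
      have := hidx (i + 1) (by simpa using Nat.succ_lt_succ hi)
      simpa using this

lemma capA_adj (r : List Int) (i : Nat) (h : i + 1 < r.length) :
    (r.getD (i+1) 0 > r.getD i 0 → (capA r).getD i 0 < (capA r).getD (i+1) 0) ∧
    (r.getD i 0 > r.getD (i+1) 0 → (capA r).getD (i+1) 0 < (capA r).getD i 0) := by
  have hi : i < r.length := by omega
  rw [capA_getD r i hi, capA_getD r (i+1) h]
  constructor
  · intro hgt
    have hinc : incRun r (i+1) = incRun r i + 1 := by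
      rw [incRun, if_pos hgt]
    have hdec : decRun r i = 0 := by
      rw [decRun, dif_pos h, if_neg (by omega)]
    rw [hinc, hdec]
    have := Nat.le_max_left (incRun r i + 1) (decRun r (i+1))
    simp only [Nat.max_zero]
    push_cast
    omega
  · intro hgt
    have hinc : incRun r (i+1) = 0 := by
      rw [incRun, if_neg (by omega)]
    have hdec : decRun r i = decRun r (i+1) + 1 := by
      rw [decRun, dif_pos h, if_pos hgt]
    rw [hinc, hdec]
    have := Nat.le_max_right (incRun r i) (decRun r (i+1) + 1)
    simp only [Nat.zero_max]
    push_cast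
    omega

lemma capA_OK (r : List Int) : OKv r (capA r) := by
  cases r with
  | nil => exact trivial
  | cons r0 rs =>
    have hlen : (capA (r0 :: rs)).length = (r0 :: rs).length := capA_len _
    obtain ⟨c0, cs, hc⟩ : ∃ c0 cs, capA (r0 :: rs) = c0 :: cs := by
      cases h : capA (r0 :: rs) with
      | nil => rw [h] at hlen; simp at hlen
      | cons c0 cs => exact ⟨c0, cs, rfl⟩
    rw [hc]
    show OKa r0 c0 rs cs
    refine OKa_of_get rs cs r0 c0 (by rw [hc] at hlen; simpa using hlen) ?_
    intro i hi
    have := capA_adj (r0 :: rs) i hi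
    rw [hc] at this
    exact this

lemma capA_ge1 (r : List Int) : ∀ x ∈ capA r, 1 ≤ x := by
  intro x hx
  simp only [capA, List.mem_map] at hx
  obtain ⟨i, _, hxe⟩ := hx
  have : (0:Int) ≤ ((max (incRun r i) (decRun r i) : Nat) : Int) := Int.natCast_nonneg _
  omega

lemma forall₂_replicate_one : ∀ (l : List Int), (∀ x ∈ l, 1 ≤ x) →
    List.Forall₂ (· ≤ ·) (List.replicate l.length 1) l := by
  intro l
  induction l with
  | nil => intro _; exact List.Forall₂.nil
  | cons x t ih =>
    intro h
    simp only [List.length_cons, List.replicate_succ]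
    exact List.Forall₂.cons (h x (List.mem_cons_self ..)) (ih fun y hy => h y (List.mem_cons_of_mem _ hy))

lemma le_sum_forall₂ : ∀ {a b : List Int}, List.Forall₂ (· ≤ ·) a b → a.sum ≤ b.sum := by
  intro a b h
  induction h with
  | nil => simp
  | cons hx ht ih => simp only [List.sum_cons]; omega

lemma passAux_len : ∀ (rs ds : List Int) (r0 d0 : Int), ds.length = rs.length →
    (passAux r0 d0 rs ds).1.length = rs.length + 1 := by
  intro rs
  induction rs with
  | nil => intro ds r0 d0 h; simp [passAux]
  | cons r1 rs' ih =>
    intro ds r0 d0 h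
    cases ds with
    | nil => simp at h
    | cons d1 ds' =>
      simp only [List.length_cons] at h ⊢
      simp only [passAux]
      split_ifs <;> simp [ih ds' _ _ (by omega)]

lemma passAux_sum_ge : ∀ (rs ds : List Int) (r0 d0 : Int), ds.length = rs.length →
    d0 + ds.sum ≤ (passAux r0 d0 rs ds).1.sum := by
  intro rs
  induction rs with
  | nil =>
    intro ds r0 d0 h
    have : ds = [] := List.eq_nil_of_length_eq_zero (by simpa using h)
    subst this; simp [passAux]
  | cons r1 rs' ih =>
    intro ds r0 d0 h
    cases ds with
    | nil => simp at h
    | cons d1 ds' =>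
      have hlen : ds'.length = rs'.length := by simpa using h
      simp only [passAux]
      split_ifs <;> simp only [List.sum_cons] <;>
        [have := ih ds' r1 (d1 + 1) hlen; have := ih ds' r1 d1 hlen;
         have := ih ds' r1 d1 hlen; have := ih ds' r1 d1 hlen;
         have := ih ds' r1 d1 hlen] <;> omega

lemma passAux_sum_lt : ∀ (rs ds : List Int) (r0 d0 : Int), ds.length = rs.length →
    (passAux r0 d0 rs ds).2 = false →
    d0 + ds.sum + 1 ≤ (passAux r0 d0 rs ds).1.sum := by
  intro rs
  induction rs with
  | nil => intro ds r0 d0 h hf; simp [passAux] at hf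
  | cons r1 rs' ih =>
    intro ds r0 d0 h hf
    cases ds with
    | nil => simp [passAux] at hf
    | cons d1 ds' =>
      have hlen : ds'.length = rs'.length := by simpa using h
      simp only [passAux] at hf ⊢
      split_ifs at hf ⊢ with h1 h2 h3 h4
      · have := passAux_sum_ge rs' ds' r1 (d1 + 1) hlen
        simp only [List.sum_cons]; omega
      · have := ih ds' r1 d1 hlen hf
        simp only [List.sum_cons]; omega
      · have := passAux_sum_ge rs' ds' r1 d1 hlen
        simp only [List.sum_cons]; omega
      · have := ih ds' r1 d1 hlen hf
        simp only [List.sum_cons]; omega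
      · have := ih ds' r1 d1 hlen hf
        simp only [List.sum_cons]; omega

lemma passAux_le : ∀ (rs ds Ms : List Int) (r0 d0 M0 : Int), ds.length = rs.length →
    d0 ≤ M0 → List.Forall₂ (· ≤ ·) ds Ms → OKa r0 M0 rs Ms →
    List.Forall₂ (· ≤ ·) (passAux r0 d0 rs ds).1 (M0 :: Ms) := by
  intro rs
  induction rs with
  | nil =>
    intro ds Ms r0 d0 M0 h hd hf hok
    have : ds = [] := List.eq_nil_of_length_eq_zero (by simpa using h)
    subst this
    cases hf
    simpa [passAux] using hd
  | cons r1 rs' ih =>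
    intro ds Ms r0 d0 M0 h hd hf hok
    cases ds with
    | nil => simp at h
    | cons d1 ds' =>
      cases hf with
      | cons hd1 hf' =>
        rename_i M1 Ms'
        have hlen : ds'.length = rs'.length := by simpa using h
        obtain ⟨hA, hB, hrest⟩ := hok
        simp only [passAux]
        split_ifs with h1 h2 h3 h4
        · exact List.Forall₂.cons hd (ih ds' Ms' r1 (d1 + 1) M1 hlen
            (by have := hA h1; omega) hf' hrest)
        · exact List.Forall₂.cons hd (ih ds' Ms' r1 d1 M1 hlen hd1 hf' hrest)
        · exact List.Forall₂.cons (by have := hB h3; omega)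
            (ih ds' Ms' r1 d1 M1 hlen hd1 hf' hrest)
        · exact List.Forall₂.cons hd (ih ds' Ms' r1 d1 M1 hlen hd1 hf' hrest)
        · exact List.Forall₂.cons hd (ih ds' Ms' r1 d1 M1 hlen hd1 hf' hrest)

lemma passFull_len (r dp : List Int) (h : dp.length = r.length) :
    (passFull r dp).1.length = r.length := by
  match r, dp with
  | [], [] => rfl
  | [], _ :: _ => simp at h
  | _ :: _, [] => simp at h
  | r0 :: rs, d0 :: ds =>
    simp only [passFull]
    have := passAux_len rs ds r0 d0 (by simpa using h)
    simpa using this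

lemma passFull_le (r M dp : List Int) (h : dp.length = r.length) (hM : M.length = r.length)
    (hOK : OKv r M) (hle : List.Forall₂ (· ≤ ·) dp M) :
    List.Forall₂ (· ≤ ·) (passFull r dp).1 M := by
  match r, dp, M with
  | [], [], _ => exact hle
  | [], _ :: _, _ => simp at h
  | _ :: _, [], _ => simp at h
  | _ :: _, _ :: _, [] => simp at hM
  | r0 :: rs, d0 :: ds, M0 :: Ms =>
    cases hle with
    | cons hd hf =>
      exact passAux_le rs ds Ms r0 d0 M0 (by simpa using h) hd hf hOK

lemma passFull_sum_lt (r dp : List Int) (h : dp.length = r.length)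
    (hf : (passFull r dp).2 = false) : dp.sum + 1 ≤ (passFull r dp).1.sum := by
  match r, dp with
  | [], [] => simp [passFull] at hf
  | [], _ :: _ => simp at h
  | _ :: _, [] => simp at h
  | r0 :: rs, d0 :: ds =>
    have := passAux_sum_lt rs ds r0 d0 (by simpa using h) hf
    simp only [passFull, List.sum_cons]
    omega


def hR (l : List Int) : Int := (rightR l).headD 1

lemma rightR_len : ∀ (l : List Int), (rightR l).length = l.length := by
  intro l
  induction l with
  | nil => rfl
  | cons r0 rs ih =>
    cases rs with
    | nil => rfl
    | cons r1 rs' =>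
      obtain ⟨v, t, hv⟩ : ∃ v t, rightR (r1 :: rs') = v :: t := by
        cases h : rightR (r1 :: rs') with
        | nil => rw [h] at ih; simp at ih
        | cons v t => exact ⟨v, t, rfl⟩
      have h2 := ih
      rw [hv] at h2
      simp only [List.length_cons] at h2
      simp [rightR, hv]
      omega

lemma rightR_ne_nil (r0 : Int) (rs : List Int) : rightR (r0 :: rs) ≠ [] := by
  intro h
  have := rightR_len (r0 :: rs)
  rw [h] at this
  simp at this

lemma rightR_cons₂ (r0 r1 : Int) (rs : List Int) :
    rightR (r0 :: r1 :: rs) = (if r0 > r1 then hR (r1 :: rs) + 1 else 1) :: rightR (r1 :: rs) := by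
  obtain ⟨v, t, hv⟩ := List.exists_cons_of_ne_nil (rightR_ne_nil r1 rs)
  simp [rightR, hv, hR]

lemma hR_cons₂ (r0 r1 : Int) (rs : List Int) :
    hR (r0 :: r1 :: rs) = if r0 > r1 then hR (r1 :: rs) + 1 else 1 := by
  rw [hR, rightR_cons₂]; rfl

lemma hR_pos : ∀ (rs : List Int) (r0 : Int), 1 ≤ hR (r0 :: rs) := by
  intro rs
  induction rs with
  | nil => intro r0; simp [hR, rightR]
  | cons r1 rs' ih =>
    intro r0
    rw [hR_cons₂]
    have := ih r1
    split <;> omega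

-- mvec with the left-pass state generalized, for the inductions below
def Mgo (r0 v : Int) (rs : List Int) : List Int :=
  List.zipWith max (goL r0 v rs) (rightR (r0 :: rs))

lemma Mgo_eq : ∀ (rs : List Int) (r0 v : Int),
    Mgo r0 v rs = max v (hR (r0 :: rs)) ::
      (match rs with
       | [] => ([] : List Int)
       | r1 :: rs' => Mgo r1 (if r1 > r0 then v + 1 else 1) rs') := by
  intro rs r0 v
  cases rs with
  | nil => simp [Mgo, goL, rightR, hR]
  | cons r1 rs' =>
    show List.zipWith max (goL r0 v (r1 :: rs')) (rightR (r0 :: r1 :: rs')) = _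
    rw [rightR_cons₂, hR_cons₂]
    simp [goL, Mgo]

lemma Mgo_OK : ∀ (rs : List Int) (r0 v : Int), 1 ≤ v →
    OKa r0 (max v (hR (r0 :: rs))) rs ((Mgo r0 v rs).tail) := by
  intro rs
  induction rs with
  | nil => intro r0 v hv; exact trivial
  | cons r1 rs' ih =>
    intro r0 v hv
    have hv' : 1 ≤ (if r1 > r0 then v + 1 else 1) := by split <;> omega
    have ihr := ih r1 (if r1 > r0 then v + 1 else 1) hv'
    rw [Mgo_eq (r1 :: rs') r0]
    simp only [List.tail_cons]
    rw [Mgo_eq rs' r1]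
    refine ⟨?_, ?_, ?_⟩
    · intro hgt
      have h1 : ¬ (r0 > r1) := by omega
      rw [hR_cons₂]
      simp only [h1, if_false]
      have h2 : (if r1 > r0 then v + 1 else 1) = v + 1 := by simp [hgt]
      rw [h2]
      have := le_max_left (v + 1) (hR (r1 :: rs'))
      have hm : max v (1 : Int) = v := by omega
      omega
    · intro hgt
      have h1 : ¬ (r1 > r0) := by omega
      rw [hR_cons₂]
      simp only [if_pos hgt]
      have h2 : (if r1 > r0 then v + 1 else 1) = 1 := by simp [h1]
      rw [h2]
      have h3 := hR_pos rs' r1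
      have hm : max (1 : Int) (hR (r1 :: rs')) = hR (r1 :: rs') := by omega
      have := le_max_right v (hR (r1 :: rs') + 1)
      omega
    · rw [Mgo_eq rs' r1] at ihr
      simpa using ihr

lemma mvec_eq_Mgo (r0 : Int) (rs : List Int) : mvec (r0 :: rs) = Mgo r0 1 rs := rfl

lemma mvec_OK : ∀ (r : List Int), OKv r (mvec r) := by
  intro r
  cases r with
  | nil => exact trivial
  | cons r0 rs =>
    have h := Mgo_OK rs r0 1 (le_refl 1)
    rw [Mgo_eq rs r0] at h
    simp only [List.tail_cons] at h
    rw [mvec_eq_Mgo, Mgo_eq rs r0]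
    exact h

lemma goL_len : ∀ (rs : List Int) (prev v : Int), (goL prev v rs).length = rs.length + 1 := by
  intro rs
  induction rs with
  | nil => intro prev v; rfl
  | cons r1 rs' ih => intro prev v; simp [goL, ih]

lemma leftL_len (r : List Int) : (leftL r).length = r.length := by
  cases r <;> simp [leftL, goL_len]

lemma mvec_len (r : List Int) : (mvec r).length = r.length := by
  simp [mvec, List.length_zipWith, leftL_len, rightR_len]

lemma Mgo_ge1 : ∀ (rs : List Int) (r0 v : Int), 1 ≤ v → ∀ x ∈ Mgo r0 v rs, 1 ≤ x := by
  intro rs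
  induction rs with
  | nil =>
    intro r0 v hv x hx
    rw [Mgo_eq] at hx
    simp at hx
    subst hx
    exact le_trans hv (le_max_left _ _)
  | cons r1 rs' ih =>
    intro r0 v hv x hx
    rw [Mgo_eq] at hx
    simp only [List.mem_cons] at hx
    rcases hx with h | h
    · subst h; exact le_trans hv (le_max_left _ _)
    · exact ih r1 _ (by split <;> omega) x h

lemma mvec_ge1 (r : List Int) : ∀ x ∈ mvec r, 1 ≤ x := by
  cases r with
  | nil => intro x hx; simp [mvec, leftL, rightR] at hx
  | cons r0 rs => rw [mvec_eq_Mgo]; exact Mgo_ge1 rs r0 1 (le_refl 1)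

lemma init_le_mvec (r : List Int) : List.Forall₂ (· ≤ ·) (List.replicate r.length 1) (mvec r) := by
  have h := forall₂_replicate_one (mvec r) (mvec_ge1 r)
  rwa [mvec_len] at h

-- a balanced sweep leaves dp satisfying all neighbour constraints
lemma passAux_bal : ∀ (rs ds : List Int) (r0 d0 : Int),
    (passAux r0 d0 rs ds).2 = true → OKa r0 d0 rs ds := by
  intro rs
  induction rs with
  | nil => intro ds r0 d0 _; cases ds <;> exact trivial
  | cons r1 rs' ih =>
    intro ds r0 d0 hb
    cases ds with
    | nil => exact trivial
    | cons d1 ds' =>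
      simp only [passAux] at hb
      split_ifs at hb with h1 h2 h3 h4
      · exact ⟨fun _ => by omega, fun h => absurd h (by omega), ih ds' r1 d1 hb⟩
      · exact ⟨fun h => absurd h (by omega), fun _ => by omega, ih ds' r1 d1 hb⟩
      · exact ⟨fun h => absurd h h1, fun h => absurd h h3, ih ds' r1 d1 hb⟩

lemma passFull_bal (r dp : List Int) (hb : (passFull r dp).2 = true) : OKv r dp := by
  match r, dp with
  | [], _ => exact trivial
  | _ :: _, [] => exact trivial
  | r0 :: rs, d0 :: ds => exact passAux_bal rs ds r0 d0 hb

-- dp stays pointwise ≥ 1 across a sweep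
lemma passAux_ge1 : ∀ (rs ds : List Int) (r0 d0 : Int), 1 ≤ d0 → (∀ x ∈ ds, 1 ≤ x) →
    ∀ x ∈ (passAux r0 d0 rs ds).1, 1 ≤ x := by
  intro rs
  induction rs with
  | nil =>
    intro ds r0 d0 hd _ x hx
    simp [passAux] at hx; omega
  | cons r1 rs' ih =>
    intro ds r0 d0 hd hds x hx
    cases ds with
    | nil => simp [passAux] at hx; omega
    | cons d1 ds' =>
      have hd1 : 1 ≤ d1 := hds d1 (List.mem_cons_self ..)
      have hds' : ∀ y ∈ ds', 1 ≤ y := fun y hy => hds y (List.mem_cons_of_mem _ hy)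
      simp only [passAux] at hx
      split_ifs at hx <;> simp only [List.mem_cons] at hx <;>
        rcases hx with h | h <;>
        first
          | omega
          | exact ih ds' r1 (d1 + 1) (by omega) hds' x h
          | exact ih ds' r1 d1 hd1 hds' x h

lemma passFull_ge1 (r dp : List Int) (h1 : ∀ x ∈ dp, 1 ≤ x) :
    ∀ x ∈ (passFull r dp).1, 1 ≤ x := by
  match r, dp with
  | [], dp => exact h1
  | _ :: _, [] => exact h1
  | r0 :: rs, d0 :: ds =>
    exact passAux_ge1 rs ds r0 d0 (h1 d0 (List.mem_cons_self ..))
      (fun y hy => h1 y (List.mem_cons_of_mem _ hy))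

-- minimality: any dp ≥ 1 satisfying the constraints dominates both greedy passes
lemma goL_le : ∀ (rs ds : List Int) (prev v d0 : Int), ds.length = rs.length →
    v ≤ d0 → (∀ x ∈ ds, 1 ≤ x) → OKa prev d0 rs ds →
    List.Forall₂ (· ≤ ·) (goL prev v rs) (d0 :: ds) := by
  intro rs
  induction rs with
  | nil =>
    intro ds prev v d0 h hv _ _
    have : ds = [] := List.eq_nil_of_length_eq_zero (by simpa using h)
    subst this
    exact List.Forall₂.cons hv List.Forall₂.nil
  | cons r1 rs' ih =>
    intro ds prev v d0 h hv hds hok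
    cases ds with
    | nil => simp at h
    | cons d1 ds' =>
      obtain ⟨hA, hB, hrest⟩ := hok
      have hd1 : 1 ≤ d1 := hds d1 (List.mem_cons_self ..)
      refine List.Forall₂.cons hv (ih ds' r1 _ d1 (by simpa using h) ?_
        (fun y hy => hds y (List.mem_cons_of_mem _ hy)) hrest)
      split
      · have := hA (by assumption); omega
      · omega

lemma leftL_le (r d : List Int) (h : d.length = r.length) (h1 : ∀ x ∈ d, 1 ≤ x)
    (hok : OKv r d) : List.Forall₂ (· ≤ ·) (leftL r) d := by
  match r, d with
  | [], [] => exact List.Forall₂.nil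
  | [], _ :: _ => simp at h
  | _ :: _, [] => simp at h
  | r0 :: rs, d0 :: ds =>
    exact goL_le rs ds r0 1 d0 (by simpa using h) (h1 d0 (List.mem_cons_self ..))
      (fun y hy => h1 y (List.mem_cons_of_mem _ hy)) hok

lemma rightR_le : ∀ (r d : List Int), d.length = r.length → (∀ x ∈ d, 1 ≤ x) →
    OKv r d → List.Forall₂ (· ≤ ·) (rightR r) d := by
  intro r
  induction r with
  | nil =>
    intro d h _ _
    have : d = [] := List.eq_nil_of_length_eq_zero (by simpa using h)
    subst this
    exact List.Forall₂.nil
  | cons r0 rs ih =>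
    intro d h h1 hok
    cases rs with
    | nil =>
      match d with
      | [d0] =>
        exact List.Forall₂.cons (h1 d0 (List.mem_cons_self ..)) List.Forall₂.nil
      | [] => simp at h
      | _ :: _ :: _ => simp at h
    | cons r1 rs' =>
      match d with
      | [] => simp at h
      | [_] => simp at h
      | d0 :: d1 :: ds =>
        obtain ⟨hA, hB, hrest⟩ := hok
        have hrec := ih (d1 :: ds) (by simpa using h)
          (fun y hy => h1 y (List.mem_cons_of_mem _ hy)) hrest
        rw [rightR_cons₂]
        refine List.Forall₂.cons ?_ hrec
        split
        · obtain ⟨v, t, hv⟩ := List.exists_cons_of_ne_nil (rightR_ne_nil r1 rs')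
          rw [hv] at hrec
          cases hrec with
          | cons hvd _ =>
            have hb := hB (by assumption)
            simp only [hR, hv, List.headD_cons]
            omega
        · exact h1 d0 (List.mem_cons_self ..)

lemma zipWith_max_le : ∀ (a b d : List Int), List.Forall₂ (· ≤ ·) a d →
    List.Forall₂ (· ≤ ·) b d → List.Forall₂ (· ≤ ·) (List.zipWith max a b) d := by
  intro a b d h1
  induction h1 generalizing b with
  | nil => intro h2; cases h2; exact List.Forall₂.nil
  | cons hx ht ih =>
    intro h2
    cases h2 with
    | cons hz hb =>
      exact List.Forall₂.cons (max_le hx hz) (ih _ hb)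

lemma mvec_min (r d : List Int) (h : d.length = r.length) (h1 : ∀ x ∈ d, 1 ≤ x)
    (hok : OKv r d) : List.Forall₂ (· ≤ ·) (mvec r) d :=
  zipWith_max_le _ _ _ (leftL_le r d h h1 hok) (rightR_le r d h h1 hok)

lemma forall₂_antisymm : ∀ {a b : List Int}, List.Forall₂ (· ≤ ·) a b →
    List.Forall₂ (· ≤ ·) b a → a = b := by
  intro a b h1 h2
  induction h1 with
  | nil => rfl
  | cons hx ht ih =>
    cases h2 with
    | cons hy hb => rw [ih hb, le_antisymm hx hy]

-- at a balanced fixpoint, dp IS mvec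
lemma fix_eq (ratings dp : List Int) (hlen : dp.length = ratings.length)
    (h1 : ∀ x ∈ dp, 1 ≤ x) (hle : List.Forall₂ (· ≤ ·) dp (mvec ratings))
    (hb : (passFull ratings dp).2 = true) : dp = mvec ratings := by
  have hok := passFull_bal ratings dp hb
  exact forall₂_antisymm hle (mvec_min ratings dp hlen h1 hok)

-- with any sufficient gas, the while-loop converges to mvec
lemma loopA_eq : ∀ (gas : Nat) (ratings dp : List Int), dp.length = ratings.length →
    (∀ x ∈ dp, 1 ≤ x) → List.Forall₂ (· ≤ ·) dp (mvec ratings) →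
    ((mvec ratings).sum - dp.sum).toNat < gas →
    loopA gas ratings dp = mvec ratings := by
  intro gas
  induction gas with
  | zero => intro ratings dp _ _ _ hf; omega
  | succ n ih =>
    intro ratings dp hlen h1 hlem hf
    rw [loopA]
    split
    · exact fix_eq ratings dp hlen h1 hlem (by assumption)
    · rename_i h
      have hlt := passFull_sum_lt ratings dp hlen (Bool.eq_false_iff.mpr h)
      have hs1 := le_sum_forall₂ (passFull_le ratings (mvec ratings) dp hlen
        (mvec_len ratings) (mvec_OK ratings) hlem)
      exact ih ratings (passFull ratings dp).1 (passFull_len ratings dp hlen)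
        (passFull_ge1 ratings dp h1)
        (passFull_le ratings (mvec ratings) dp hlen (mvec_len ratings) (mvec_OK ratings) hlem)
        (by omega)

-- ===== VERDICT (by name: the statement is the Claim_ definition above) =====
theorem candy1_spec : Claim_equal_candy1 := by
  unfold Claim_equal_candy1
  intro ratings _
  show candy1 ratings = candy1_alt ratings
  unfold candy1 candy1_alt
  split_ifs with h
  · match ratings, h with
    | [a], _ => simp [mvec, leftL, goL, rightR]
  · have hcap := le_sum_forall₂ (mvec_min ratings (capA ratings) (capA_len ratings)
      (capA_ge1 ratings) (capA_OK ratings))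
    have hrep : (List.replicate ratings.length (1 : Int)).sum = (ratings.length : Int) := by
      simp [List.sum_replicate]
    have hn : (0 : Int) ≤ (ratings.length : Int) := by positivity
    rw [loopA_eq ((capA ratings).sum.toNat + 1) ratings (List.replicate ratings.length 1)
      (by simp) (fun x hx => by rw [List.eq_of_mem_replicate hx]) (init_le_mvec ratings)
      (by rw [hrep]; omega)]
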